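-- pv_equiv track=rewrite | github.com/Yanksi/nccl_generator_v2 | nsys_events_common.py | _rule_dp
-- ===== SOURCE A (Python) =====
-- def _rule_dp(label_seq: str) -> bool:
--     """
--     Check for fully sharded data parallelism pattern.
--     The collective sequence should be like AAADDDAAADDD...
--     """
--     n_a = 0
--     for c in label_seq:
--         if c == "A":
--             n_a += 1
--         else:
--             break
--     if n_a == 0:
--         return False
--     for i in range(0, len(label_seq), 2 * n_a):
--         if label_seq[i:i+n_a] != "A" * n_a:
--             return False
--         if label_seq[i+n_a:i+2*n_a] != "D" * n_a and i + n_a < len(label_seq):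
--             return False
--     return True
-- ===== SOURCE B (Python) =====
-- def _rule_dp(label_seq: str) -> bool:
--     n = len(label_seq) - len(label_seq.lstrip("A"))
--     if n == 0:
--         return False
--     block = "A" * n + "D" * n
--     s = label_seq
--     while s.startswith(block):
--         s = s[len(block):]
--     return s == "" or s == "A" * n
-- ===== Notes on version B (the rewrite author's own statement) =====
-- stated objective: idiomatic
-- what changed: Replaces A's index loop stepping 2*n_a over the string with slice-by-slice comparisons by a single prefix-stripping loop that repeatedly removes the fixed block 'A'*n+'D'*n from the front and checks the remainder is empty or a bare 'A'*n tail.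
import Mathlib
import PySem

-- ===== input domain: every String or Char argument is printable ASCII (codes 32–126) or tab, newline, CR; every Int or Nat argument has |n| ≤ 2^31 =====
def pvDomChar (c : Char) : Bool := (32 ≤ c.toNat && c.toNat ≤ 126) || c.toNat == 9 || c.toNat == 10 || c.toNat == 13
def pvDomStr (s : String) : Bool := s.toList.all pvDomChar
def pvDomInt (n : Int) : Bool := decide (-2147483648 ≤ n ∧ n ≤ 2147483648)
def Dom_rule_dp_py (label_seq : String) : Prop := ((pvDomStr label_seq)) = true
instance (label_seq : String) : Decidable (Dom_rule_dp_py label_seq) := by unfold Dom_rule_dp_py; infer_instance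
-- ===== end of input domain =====

-- B replaces A's stride-2n index loop with slice comparisons by a prefix-stripping
-- loop over the fixed block 'A'*n+'D'*n (objective: more idiomatic, same cost).

-- ===== PORT A =====
-- first loop of A: count leading 'A's, breaking at the first other character
def pvCountA : List Char → Nat
  | [] => 0
  | c :: cs => if c = 'A' then pvCountA cs + 1 else 0

-- second loop of A: for i in range(0, len, 2*n) with the two early-return checks
def pvLoopA (s : List Char) (n : Nat) : List Int → Bool
  | [] => true
  | i :: rest =>
    if PySem.List.slice s (some i) (some (i + (n : Int))) ≠ List.replicate n 'A' then false
    else if PySem.List.slice s (some (i + (n : Int))) (some (i + 2 * (n : Int))) ≠ List.replicate n 'D'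
            ∧ i + (n : Int) < (s.length : Int) then false
    else pvLoopA s n rest

def rule_dp_py (label_seq : String) : Bool :=
  let s := label_seq.toList
  let n := pvCountA s
  if n = 0 then false
  else pvLoopA s n (PySem.List.pyRange 0 (s.length : Int) (2 * (n : Int)))

-- ===== PORT B =====
-- while s.startswith(block): s = s[len(block):]
def pvStrip (block s : List Char) : List Char :=
  if h : block ≠ [] ∧ block.isPrefixOf s then
    pvStrip block (s.drop block.length)
  else s
termination_by s.length
decreasing_by
  have hp : block.length ≤ s.length := (List.isPrefixOf_iff_prefix.mp h.2).length_le
  have hb : 0 < block.length := List.length_pos_iff.mpr h.1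
  simp only [List.length_drop]; omega

def rule_dp_py_alt (label_seq : String) : Bool :=
  let l := label_seq.toList
  -- len(label_seq) - len(label_seq.lstrip("A")) ported by hand:
  -- lstrip("A") drops exactly the leading 'A' characters (exact)
  let n := l.length - (l.dropWhile (fun c => c = 'A')).length
  if n = 0 then false
  else
    let t := pvStrip (List.replicate n 'A' ++ List.replicate n 'D') l
    (t == []) || (t == List.replicate n 'A')

-- ===== PRECONDITION & SPEC =====
def Spec_rule_dp_py (label_seq : String) (out : Bool) : Prop := out = rule_dp_py_alt label_seq
instance (label_seq : String) (out : Bool) : Decidable (Spec_rule_dp_py label_seq out) := by unfold Spec_rule_dp_py; infer_instance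

-- ===== CLAIM (what is proved, stated in full; the proofs are below) =====
def Claim_equal_rule_dp_py : Prop := ∀ (label_seq : String), Dom_rule_dp_py label_seq → Spec_rule_dp_py label_seq (rule_dp_py label_seq)

-- ===== LEMMAS AND PROOFS =====

-- A's leading-'A' count equals B's len - len(lstrip('A'))
theorem pvCountA_eq (l : List Char) :
    pvCountA l = l.length - (l.dropWhile (fun c => c = 'A')).length := by
  induction l with
  | nil => simp [pvCountA]
  | cons c cs ih =>
    have hle := List.length_dropWhile_le (fun c : Char => decide (c = 'A')) cs
    by_cases h : c = 'A'
    · simp [pvCountA, h, ih]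
      omega
    · simp [pvCountA, h]

-- pyRange with a positive step: nil and cons forms
theorem pyRange_pos_nil (a b s : Int) (hs : 0 < s) (hab : b ≤ a) :
    PySem.List.pyRange a b s = [] := by
  rw [PySem.List.pyRange_of_pos a b hs, if_neg (by omega)]
  simp

theorem pyRange_pos_cons (a b s : Int) (hs : 0 < s) (hab : a < b) :
    PySem.List.pyRange a b s = a :: PySem.List.pyRange (a + s) b s := by
  rw [PySem.List.pyRange_of_pos a b hs, PySem.List.pyRange_of_pos (a + s) b hs,
      if_pos hab]
  have hs0 : s ≠ 0 := by omega
  have hkey : (b - a + s - 1) / s = (b - (a + s) + s - 1) / s + 1 := by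
    have : b - a + s - 1 = (b - (a + s) + s - 1) + 1 * s := by ring
    rw [this, Int.add_mul_ediv_right _ _ hs0]
  by_cases hcase : a + s < b
  · rw [if_pos hcase, hkey]
    have hq : 0 ≤ (b - (a + s) + s - 1) / s := by
      apply Int.ediv_nonneg <;> omega
    rw [show ((b - (a + s) + s - 1) / s + 1).toNat = ((b - (a + s) + s - 1) / s).toNat + 1 by omega]
    rw [List.range_succ_eq_map]
    simp only [List.map_cons, List.map_map]
    congr 1
    · push_cast; ring
    · apply List.map_congr_left; intro k _; simp only [Function.comp_apply]; push_cast; ring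
  · rw [if_neg hcase]
    have hz : (b - (a + s) + s - 1) / s = 0 := by
      apply Int.ediv_eq_zero_of_lt <;> omega
    rw [hkey, hz]
    norm_num

-- one unfolding of pvStrip in the "block is a prefix" case
theorem pvStrip_cons (block s : List Char) (h1 : block ≠ []) (h2 : block.isPrefixOf s) :
    pvStrip block s = pvStrip block (s.drop block.length) := by
  rw [pvStrip]; rw [dif_pos ⟨h1, h2⟩]

theorem pvStrip_stuck (block s : List Char) (h : ¬ (block ≠ [] ∧ block.isPrefixOf s)) :
    pvStrip block s = s := by
  rw [pvStrip]; rw [dif_neg h]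

-- core: A's loop from index i equals B's stripping of the suffix s.drop i
theorem loop_eq (s : List Char) (n : Nat) (hn : 0 < n) :
    ∀ (k i : Nat), s.length - i ≤ k →
    pvLoopA s n (PySem.List.pyRange (i : Int) (s.length : Int) (2 * (n : Int))) =
      (let t := pvStrip (List.replicate n 'A' ++ List.replicate n 'D') (s.drop i)
       (t == []) || (t == List.replicate n 'A')) := by
  intro k
  induction k with
  | zero =>
    intro i hk
    have hi : s.length ≤ i := by omega
    rw [pyRange_pos_nil _ _ _ (by positivity) (by exact_mod_cast hi)]
    rw [List.drop_eq_nil_of_le hi]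
    rw [pvStrip_stuck _ _ (by
      intro ⟨h1, h2⟩
      exact h1 (List.prefix_nil.mp (List.isPrefixOf_iff_prefix.mp h2)))]
    simp [pvLoopA]
  | succ k ih =>
    intro i hk
    by_cases hi : s.length ≤ i
    · rw [pyRange_pos_nil _ _ _ (by positivity) (by exact_mod_cast hi)]
      rw [List.drop_eq_nil_of_le hi]
      rw [pvStrip_stuck _ _ (by
        intro ⟨h1, h2⟩
        exact h1 (List.prefix_nil.mp (List.isPrefixOf_iff_prefix.mp h2)))]
      simp [pvLoopA]
    · push Not at hi
      set t := s.drop i with ht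
      set block := List.replicate n 'A' ++ List.replicate n 'D' with hblk
      have htl : t.length = s.length - i := by simp [ht]
      have htpos : 0 < t.length := by omega
      have hblen : block.length = 2 * n := by simp [hblk]; omega
      rw [pyRange_pos_cons _ _ _ (by positivity) (by exact_mod_cast hi)]
      rw [pvLoopA]
      -- rewrite the two slices as take/drop of t
      have hsl1 : PySem.List.slice s (some (i : Int)) (some ((i : Int) + (n : Int))) = t.take n := by
        rw [PySem.List.slice_natCast_add]
      have hsl2 : PySem.List.slice s (some ((i : Int) + (n : Int))) (some ((i : Int) + 2 * (n : Int))) =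
          (t.drop n).take n := by
        have : (i : Int) + (n : Int) = ((i + n : Nat) : Int) := by push_cast; ring
        rw [this, show ((i : Int) + 2 * (n : Int)) = ((i + n : Nat) : Int) + (n : Int) by push_cast; ring]
        rw [PySem.List.slice_natCast_add, ht, List.drop_drop]
      rw [hsl1, hsl2]
      by_cases h1 : t.take n = List.replicate n 'A'
      · -- first check passes, so n ≤ t.length
        have hn_le : n ≤ t.length := by
          have := congrArg List.length h1
          simp at this; omega
        by_cases hmid : n < t.length
        · -- the "i + n < len" guard holds
          have hguard : (i : Int) + (n : Int) < (s.length : Int) := by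
            push_cast; omega
          by_cases h2 : (t.drop n).take n = List.replicate n 'D'
          · -- full block present: both sides step to drop (i + 2n)
            rw [if_neg (by simp [h1]), if_neg (by simp [h2])]
            have hpre : block.isPrefixOf t := by
              rw [List.isPrefixOf_iff_prefix, List.prefix_iff_eq_take, hblen,
                  show 2 * n = n + n by ring, List.take_add, h1, h2, hblk]
            rw [pvStrip_cons _ _ (by simp [hblk]; omega) hpre, hblen]
            rw [ht, List.drop_drop]
            rw [show (i : Int) + 2 * (n : Int) = ((i + 2 * n : Nat) : Int) by push_cast; ring]
            rw [ih (i + 2 * n) (by omega)]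
          · -- A^n then not D^n while more characters remain: both false
            rw [if_neg (by simp [h1]), if_pos ⟨by simp [h2], hguard⟩]
            have hnots : ¬ (block ≠ [] ∧ block.isPrefixOf t) := by
              rintro ⟨-, hp⟩
              apply h2
              have := (List.prefix_iff_eq_take.mp (List.isPrefixOf_iff_prefix.mp hp))
              rw [hblen, show 2 * n = n + n by ring, List.take_add, hblk] at this
              have := (List.append_inj this (by simp [h1])).2
              exact this.symm
            rw [pvStrip_stuck _ _ hnots]
            have hne1 : (t == []) = false := by
              simp; intro h; rw [h] at htpos; simp at htpos
            have hne2 : (t == List.replicate n 'A') = false := by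
              simp; intro h
              have := congrArg List.length h; simp at this; omega
            simp [hne1, hne2]
          -- end inner by_cases
        · -- n = t.length: t = A^n, guard fails, loop ends next round
          have hteq : t = List.replicate n 'A' := by
            rw [← h1, List.take_of_length_le (by omega)]
          have hguard : ¬ ((i : Int) + (n : Int) < (s.length : Int)) := by
            push_cast; omega
          rw [if_neg (by simp [h1]), if_neg (by rintro ⟨-, h⟩; exact hguard h)]
          rw [pyRange_pos_nil _ _ _ (by positivity) (by push_cast; omega)]
          rw [pvLoopA]
          have hnots : ¬ (block ≠ [] ∧ block.isPrefixOf t) := by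
            rintro ⟨-, hp⟩
            have := (List.isPrefixOf_iff_prefix.mp hp).length_le
            rw [hblen] at this; omega
          rw [pvStrip_stuck _ _ hnots]
          simp [hteq]
      · -- first slice is not A^n: both sides are false
        rw [if_pos (by simp [h1])]
        have hnots : ¬ (block ≠ [] ∧ block.isPrefixOf t) := by
          rintro ⟨-, hp⟩
          apply h1
          have hlen2 : 2 * n ≤ t.length := by
            have := (List.isPrefixOf_iff_prefix.mp hp).length_le
            omega
          have := List.prefix_iff_eq_take.mp (List.isPrefixOf_iff_prefix.mp hp)
          rw [hblen, show 2 * n = n + n by ring, List.take_add, hblk] at this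
          exact ((List.append_inj this (by simp; omega)).1).symm
        rw [pvStrip_stuck _ _ hnots]
        have hne1 : (t == []) = false := by
          simp; intro h; rw [h] at htpos; simp at htpos
        have hne2 : (t == List.replicate n 'A') = false := by
          simp; intro h
          apply h1
          rw [h, List.take_replicate]
          congr 1
          have := congrArg List.length h; simp at this; omega
        simp [hne1, hne2]

-- ===== VERDICT (by name: the statement is the Claim_ definition above) =====
theorem rule_dp_py_spec : Claim_equal_rule_dp_py := by
  intro label_seq _
  unfold Spec_rule_dp_py rule_dp_py rule_dp_py_alt
  simp only
  rw [← pvCountA_eq]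
  by_cases hz : pvCountA label_seq.toList = 0
  · simp [hz]
  · rw [if_neg hz, if_neg hz]
    have := loop_eq label_seq.toList (pvCountA label_seq.toList) (by omega)
      label_seq.toList.length 0 (by omega)
    simpa using this
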